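-- pv_equiv track=rewrite | github.com/Yassinecoder06/ACM | Codeforces Contests/Codeforces Round 1076 (Div. 3)/test_monster.py | brute_solve
-- ===== SOURCE A (Python) =====
-- def brute_solve(a,b):
--     n = len(a)
--     best = 0
--     for x in range(0, max(a)+1):
--         cnt = sum(1 for val in a if val >= x)
--         # compute how many levels
--         cur = 0
--         k = 0
--         for bi in b:
--             if cur + bi <= cnt:
--                 cur += bi
--                 k += 1
--             else:
--                 break
--         if x * k > best:
--             best = x * k
--     return best
-- ===== SOURCE B (Python) =====
-- def brute_solve(a, b):
--     # One pass over b instead of a loop over every threshold x: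
--     # for each level count k, the minimal number of monsters needed is the
--     # running max of b's prefix sums; the best threshold for that k is the
--     # k-th largest-enough element of sorted(a).
--     sa = sorted(a)
--     n = len(sa)
--     best = 0
--     s = 0
--     need = 0
--     k = 0
--     for bi in b:
--         s += bi
--         if s > need:
--             need = s
--         if need > n:
--             break
--         k += 1
--         x = sa[n - need] if need > 0 else sa[n - 1]
--         if x * k > best:
--             best = x * k
--     return best
-- ===== Notes on version B (the rewrite author's own statement) =====
-- stated objective: faster
-- what changed: Instead of trying every threshold x in range(0,max(a)+1) and re-running the count and greedy level scan for each (O(max(a)*(n+m))), B makes one pass over b maintaining the running-max prefix sum 'need' (the minimal monster count to clear k levels) and reads the best threshold for each k directly from sorted(a) as its need-th largest element (O(n log n + m)).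
import Mathlib
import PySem

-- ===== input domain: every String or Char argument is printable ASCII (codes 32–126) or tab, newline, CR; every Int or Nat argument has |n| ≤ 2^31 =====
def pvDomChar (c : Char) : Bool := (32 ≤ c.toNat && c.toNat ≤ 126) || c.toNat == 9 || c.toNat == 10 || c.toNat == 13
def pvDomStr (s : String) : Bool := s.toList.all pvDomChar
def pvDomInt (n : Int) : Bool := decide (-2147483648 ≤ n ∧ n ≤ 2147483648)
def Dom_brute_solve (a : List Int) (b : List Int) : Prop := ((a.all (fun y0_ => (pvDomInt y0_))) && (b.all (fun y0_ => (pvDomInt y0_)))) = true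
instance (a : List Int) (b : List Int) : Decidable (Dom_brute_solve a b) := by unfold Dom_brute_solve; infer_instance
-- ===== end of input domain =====

-- B replaces A's scan over every threshold x in 0..max(a) by a single pass over b
-- (running-max prefix sums) with the best threshold for each level count read off
-- sorted(a); objective: faster.

-- ===== PORT A =====
-- inner 'for bi in b: if cur+bi<=cnt: cur+=bi; k+=1 else: break'
def pyGreedyA (cnt : Int) : List Int → Int → Int → Int
  | [], _, k => k
  | bi :: rest, cur, k =>
    if cur + bi ≤ cnt then pyGreedyA cnt rest (cur + bi) (k + 1) else k

def brute_solve (a : List Int) (b : List Int) : Int :=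
  (PySem.List.pyRange 0 (((PySem.List.max? a (fun x => x)).getD 0) + 1) 1).foldl
    (fun best x =>
      let cnt : Int := (a.countP (fun v => decide (x ≤ v)) : Int)
      let k := pyGreedyA cnt b 0 0
      if x * k > best then x * k else best) 0

-- ===== PORT B =====
-- the 'for bi in b' loop of Source B, with its break
def altLoop (sa : List Int) (n : Int) : List Int → Int → Int → Int → Int → Int
  | [], _, _, _, best => best
  | bi :: rest, s, need, k, best =>
    let s' := s + bi
    let need' := if s' > need then s' else need
    if need' > n then best
    else
      let k' := k + 1
      let x := if need' > 0 then (PySem.List.pyGet? sa (n - need')).getD 0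
               else (PySem.List.pyGet? sa (n - 1)).getD 0
      altLoop sa n rest s' need' k' (if x * k' > best then x * k' else best)

def brute_solve_alt (a : List Int) (b : List Int) : Int :=
  let sa := PySem.List.sorted a (fun x => x) false
  let n : Int := (sa.length : Int)
  altLoop sa n b 0 0 0 0

-- ===== PRECONDITION & SPEC =====
-- Pre_ excludes a = [], on which Python A raises ValueError (max of empty sequence).
def Pre_brute_solve (a : List Int) (b : List Int) : Prop := a ≠ []
instance (a : List Int) (b : List Int) : Decidable (Pre_brute_solve a b) := by
  unfold Pre_brute_solve; infer_instance

def pvWitness_brute_solve : List Int × List Int := ([1, 3, 2], [2, 1])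

def Spec_brute_solve (a : List Int) (b : List Int) (out : Int) : Prop := out = brute_solve_alt a b
instance (a : List Int) (b : List Int) (out : Int) : Decidable (Spec_brute_solve a b out) := by
  unfold Spec_brute_solve; infer_instance

-- ===== CLAIM (what is proved, stated in full; the proofs are below) =====
def Claim_equal_brute_solve : Prop := ∀ (a : List Int) (b : List Int), Dom_brute_solve a b → Pre_brute_solve a b → Spec_brute_solve a b (brute_solve a b)

-- ===== LEMMAS AND PROOFS =====

-- proof-side: the threshold B reads off for a given 'need'
def xOf (sa : List Int) (n need : Int) : Int :=
  if need > 0 then (PySem.List.pyGet? sa (n - need)).getD 0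
  else (PySem.List.pyGet? sa (n - 1)).getD 0

-- proof-side: the running-max prefix sums of b, from sum s and max-so-far m
def needsFrom (s m : Int) : List Int → List Int
  | [] => []
  | bi :: r => (max m (s + bi)) :: needsFrom (s + bi) (max m (s + bi)) r

-- proof-side: the products x*k that B's loop takes the max of
def termsFrom (sa : List Int) (n : Int) (s m k : Int) : List Int → List Int
  | [] => []
  | bi :: r =>
    if max m (s + bi) > n then []
    else xOf sa n (max m (s + bi)) * (k + 1) :: termsFrom sa n (s + bi) (max m (s + bi)) (k + 1) r

lemma foldl_max_le (l : List Int) (init C : Int) (h0 : init ≤ C) (h : ∀ x ∈ l, x ≤ C) :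
    l.foldl max init ≤ C := by
  induction l generalizing init with
  | nil => simpa using h0
  | cons y t ih =>
      exact ih (max init y) (max_le h0 (h y (List.mem_cons_self))) (fun x hx => h x (List.mem_cons_of_mem _ hx))

lemma altLoop_eq_foldl (sa : List Int) (n : Int) :
    ∀ (rest : List Int) (s m k best : Int),
      altLoop sa n rest s m k best = (termsFrom sa n s m k rest).foldl max best := by
  intro rest
  induction rest with
  | nil => intro s m k best; simp [altLoop, termsFrom]
  | cons bi r ih =>
      intro s m k best
      have hm : (if s + bi > m then s + bi else m) = max m (s + bi) := by
        rcases le_or_gt (s + bi) m with h | h <;> simp [max_def] <;> omega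
      by_cases hbr : max m (s + bi) > n
      · simp only [altLoop, termsFrom, hm, if_pos hbr, List.foldl_nil]
      · have hx : (if max m (s + bi) > 0 then (PySem.List.pyGet? sa (n - max m (s + bi))).getD 0
              else (PySem.List.pyGet? sa (n - 1)).getD 0) = xOf sa n (max m (s + bi)) := rfl
        have hb : ∀ t : Int, (if t > best then t else best) = max best t := by
          intro t; rcases le_or_gt t best with h | h <;> simp [max_def] <;> omega
        simp only [altLoop, termsFrom, hm, if_neg hbr, hx, hb, List.foldl_cons]
        exact ih _ _ _ _

lemma foldl_if_max (g : Int → Int) :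
    ∀ (l : List Int) (init : Int),
      l.foldl (fun best x => if g x > best then g x else best) init
        = l.foldl (fun best x => max best (g x)) init := by
  intro l
  induction l with
  | nil => intro init; simp
  | cons y t ih =>
      intro init
      have : (if g y > init then g y else init) = max init (g y) := by
        rcases le_or_gt (g y) init with h | h <;> simp [max_def] <;> omega
      simp only [List.foldl_cons, this, ih]

-- greedy over b = count of leading running-max prefix sums ≤ cnt
lemma greedy_eq_takeWhile (c : Int) :
    ∀ (b : List Int) (s m k : Int), m ≤ c →
      pyGreedyA c b s k
        = k + (((needsFrom s m b).takeWhile (fun v => decide (v ≤ c))).length : Int) := by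
  intro b
  induction b with
  | nil => intro s m k _; simp [pyGreedyA, needsFrom]
  | cons bi r ih =>
      intro s m k hm
      by_cases h : s + bi ≤ c
      · have hm' : max m (s + bi) ≤ c := max_le hm h
        have hih := ih (s + bi) (max m (s + bi)) (k + 1) hm'
        simp only [pyGreedyA, needsFrom, if_pos h, hih]
        rw [List.takeWhile_cons]
        simp only [decide_eq_true_eq, if_pos hm', List.length_cons]
        push_cast
        ring
      · have hm' : ¬ (max m (s + bi) ≤ c) := fun hc => h (le_trans (le_max_right m (s + bi)) hc)
        simp only [pyGreedyA, needsFrom, if_neg h]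
        rw [List.takeWhile_cons]
        simp only [decide_eq_true_eq, if_neg hm', List.length_nil]
        simp

lemma needsFrom_pairwise : ∀ (b : List Int) (s m : Int),
    List.Pairwise (· ≤ ·) (m :: needsFrom s m b) := by
  intro b
  induction b with
  | nil => intro s m; simp [needsFrom]
  | cons bi r ih =>
      intro s m
      have h := ih (s + bi) (max m (s + bi))
      simp only [needsFrom]
      rw [List.pairwise_cons]
      refine ⟨?_, h⟩
      intro y hy
      rcases List.mem_cons.mp hy with rfl | hy
      · exact le_max_left _ _
      · exact le_trans (le_max_left _ _) ((List.pairwise_cons.mp h).1 y hy)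

lemma t_mem (sa : List Int) (n : Int) :
    ∀ (b : List Int) (s m k t : Int), t ∈ termsFrom sa n s m k b →
      ∃ (j : Nat) (need : Int), (needsFrom s m b)[j]? = some need ∧ need ≤ n ∧
        t = xOf sa n need * (k + (j : Int) + 1) := by
  intro b
  induction b with
  | nil => intro s m k t ht; simp [termsFrom] at ht
  | cons bi r ih =>
      intro s m k t ht
      simp only [termsFrom] at ht
      by_cases hbr : max m (s + bi) > n
      · rw [if_pos hbr] at ht; simp at ht
      · rw [if_neg hbr] at ht
        rcases List.mem_cons.mp ht with rfl | ht
        · exact ⟨0, max m (s + bi), by simp [needsFrom], by omega, by push_cast; ring⟩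
        · rcases ih (s + bi) (max m (s + bi)) (k + 1) t ht with ⟨j, need, h1, h2, h3⟩
          refine ⟨j + 1, need, by simpa [needsFrom] using h1, h2, ?_⟩
          rw [h3]; push_cast; ring

lemma t_cov (sa : List Int) (n : Int) :
    ∀ (b : List Int) (s m k : Int) (j : Nat) (need : Int),
      (needsFrom s m b)[j]? = some need → need ≤ n →
      xOf sa n need * (k + (j : Int) + 1) ∈ termsFrom sa n s m k b := by
  intro b
  induction b with
  | nil => intro s m k j need h _; simp [needsFrom] at h
  | cons bi r ih =>
      intro s m k j need h hn
      simp only [needsFrom] at h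
      cases j with
      | zero =>
          obtain rfl : max m (s + bi) = need := by simpa using h
          simp only [termsFrom, if_neg (by omega : ¬ max m (s + bi) > n)]
          norm_num
      | succ j =>
          rw [List.getElem?_cons_succ] at h
          have hmem : need ∈ needsFrom (s + bi) (max m (s + bi)) r := List.mem_of_getElem? h
          have hle : max m (s + bi) ≤ need :=
            (List.pairwise_cons.mp (needsFrom_pairwise r (s + bi) (max m (s + bi)))).1 need hmem
          simp only [termsFrom, if_neg (by omega : ¬ max m (s + bi) > n)]
          refine List.mem_cons_of_mem _ ?_
          have hrec := ih (s + bi) (max m (s + bi)) (k + 1) j need h hn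
          have harith : (k + 1) + (j : Int) + 1 = k + ((j + 1 : Nat) : Int) + 1 := by push_cast; ring
          rwa [harith] at hrec

-- takeWhile length on a sorted list from a witness element
lemma takeWhile_len_ge (c : Int) :
    ∀ (l : List Int) (j : Nat) (v : Int), List.Pairwise (· ≤ ·) l → l[j]? = some v → v ≤ c →
      j + 1 ≤ (l.takeWhile (fun u => decide (u ≤ c))).length := by
  intro l
  induction l with
  | nil => intro j v _ h _; simp at h
  | cons h0 t ih =>
      intro j v hp hj hv
      have hh : h0 ≤ c := by
        cases j with
        | zero =>
            obtain rfl : h0 = v := by simpa using hj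
            exact hv
        | succ j =>
            rw [List.getElem?_cons_succ] at hj
            exact le_trans ((List.pairwise_cons.mp hp).1 v (List.mem_of_getElem? hj)) hv
      rw [List.takeWhile_cons]
      simp only [decide_eq_true_eq, if_pos hh, List.length_cons]
      cases j with
      | zero => omega
      | succ j =>
          rw [List.getElem?_cons_succ] at hj
          have := ih j v (List.pairwise_cons.mp hp).2 hj hv
          omega

def cntI (a : List Int) (x : Int) : Int := (a.countP (fun v => decide (x ≤ v)) : Int)

def fA (a b : List Int) (x : Int) : Int := x * pyGreedyA (cntI a x) b 0 0

lemma A_char (a b : List Int) :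
    brute_solve a b
      = ((PySem.List.pyRange 0 (((PySem.List.max? a (fun x => x)).getD 0) + 1) 1).map
          (fA a b)).foldl max 0 := by
  rw [List.foldl_map]
  show (PySem.List.pyRange 0 _ 1).foldl
      (fun best x => if fA a b x > best then fA a b x else best) 0 = _
  rw [foldl_if_max (fA a b)]

lemma B_char (a b : List Int) :
    brute_solve_alt a b
      = (termsFrom (PySem.List.sorted a (fun x => x) false)
          ((PySem.List.sorted a (fun x => x) false).length : Int) 0 0 0 b).foldl max 0 :=
  altLoop_eq_foldl _ _ b 0 0 0 0

-- at least j elements of sa are ≥ sa[len-j], for a getElem-monotone sa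
lemma countP_ge_at (sa : List Int)
    (hmono : ∀ (p q : Nat) (hpq : p ≤ q) (hq : q < sa.length), sa[p]'(by omega) ≤ sa[q])
    (j : Nat) (hj1 : 1 ≤ j) (hj2 : j ≤ sa.length) :
    j ≤ sa.countP (fun v => decide (sa[sa.length - j]'(by omega) ≤ v)) := by
  have hi : sa.length - j < sa.length := by omega
  have h1 : (sa.drop (sa.length - j)).countP (fun v => decide (sa[sa.length - j]'hi ≤ v))
      = (sa.drop (sa.length - j)).length := by
    rw [List.countP_eq_length]
    intro v hv
    obtain ⟨k, hk, rfl⟩ := List.mem_iff_getElem.mp hv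
    rw [List.getElem_drop]
    have hk' : sa.length - j + k < sa.length := by
      have := hk; simp [List.length_drop] at this; omega
    exact decide_eq_true (hmono (sa.length - j) (sa.length - j + k) (by omega) hk')
  have h2 : sa.countP (fun v => decide (sa[sa.length - j]'hi ≤ v))
      = (sa.take (sa.length - j)).countP (fun v => decide (sa[sa.length - j]'hi ≤ v))
        + (sa.drop (sa.length - j)).countP (fun v => decide (sa[sa.length - j]'hi ≤ v)) := by
    rw [← List.countP_append, List.take_append_drop]
  have h3 : (sa.drop (sa.length - j)).length = j := by simp [List.length_drop]; omega
  omega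

-- if x is above sa[len-j], fewer than j elements of sa are ≥ x
lemma countP_le_of_gt (sa : List Int)
    (hmono : ∀ (p q : Nat) (hpq : p ≤ q) (hq : q < sa.length), sa[p]'(by omega) ≤ sa[q])
    (x : Int) (j : Nat) (hj1 : 1 ≤ j) (hj2 : j ≤ sa.length)
    (hgt : sa[sa.length - j]'(by omega) < x) :
    sa.countP (fun v => decide (x ≤ v)) ≤ j - 1 := by
  have hi : sa.length - j < sa.length := by omega
  have h1 : (sa.take (sa.length - j + 1)).countP (fun v => decide (x ≤ v)) = 0 := by
    rw [List.countP_eq_zero]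
    intro v hv
    obtain ⟨k, hk, rfl⟩ := List.mem_iff_getElem.mp hv
    have hk' : k < sa.length - j + 1 := by
      have := hk; simp [List.length_take] at this; omega
    rw [List.getElem_take]
    have hle : sa[k]'(by omega) ≤ sa[sa.length - j]'hi := hmono k (sa.length - j) (by omega) hi
    simp only [decide_eq_true_eq]
    omega
  have h2 : sa.countP (fun v => decide (x ≤ v))
      = (sa.take (sa.length - j + 1)).countP (fun v => decide (x ≤ v))
        + (sa.drop (sa.length - j + 1)).countP (fun v => decide (x ≤ v)) := by
    rw [← List.countP_append, List.take_append_drop]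
  have h3 : (sa.drop (sa.length - j + 1)).countP (fun v => decide (x ≤ v))
      ≤ sa.length - (sa.length - j + 1) := by
    calc _ ≤ (sa.drop (sa.length - j + 1)).length := List.countP_le_length
    _ = sa.length - (sa.length - j + 1) := by simp [List.length_drop]
  omega

lemma xOf_eval (sa : List Int) (need : Int) (h1 : 1 ≤ need) (h2 : need ≤ (sa.length : Int)) :
    xOf sa (sa.length : Int) need = sa[sa.length - need.toNat]'(by omega) := by
  unfold xOf
  rw [if_pos (by omega : need > 0),
    PySem.List.pyGet?_eq_some_getElem sa (by omega) (by omega), Option.getD_some]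
  have : ((sa.length : Int) - need).toNat = sa.length - need.toNat := by omega
  simp only [this]

lemma xOf_zero (sa : List Int) (hlen : 0 < sa.length) :
    xOf sa (sa.length : Int) 0 = sa[sa.length - 1]'(by omega) := by
  unfold xOf
  rw [if_neg (by omega),
    PySem.List.pyGet?_eq_some_getElem sa (by omega) (by omega), Option.getD_some]
  have : ((sa.length : Int) - 1).toNat = sa.length - 1 := by omega
  simp only [this]

lemma main_eq (a b : List Int) (ha : a ≠ []) : brute_solve a b = brute_solve_alt a b := by
  set sa := PySem.List.sorted a (fun x => x) false with hsa
  have hperm : sa.Perm a := PySem.List.sorted_perm a _ false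
  have hmono : ∀ (p q : Nat) (hpq : p ≤ q) (hq : q < sa.length), sa[p]'(by omega) ≤ sa[q] := by
    intro p q hpq hq
    exact PySem.List.sorted_id_getElem_mono a hpq hq
  have hlen0 : 0 < sa.length := by
    rw [hperm.length_eq]; exact List.length_pos_of_ne_nil ha
  have hcnt_sa : ∀ x : Int, cntI a x = (sa.countP (fun v => decide (x ≤ v)) : Int) := by
    intro x; unfold cntI; rw [List.Perm.countP_eq _ hperm]
  have hcnt0 : ∀ x : Int, 0 ≤ cntI a x := by
    intro x; unfold cntI; exact_mod_cast Nat.zero_le _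
  have hcnt_len : ∀ x : Int, cntI a x ≤ (sa.length : Int) := by
    intro x; rw [hcnt_sa x]; exact_mod_cast List.countP_le_length
  obtain ⟨Mv, hMv⟩ : ∃ m, PySem.List.max? a (fun x => x) = some m := by
    cases hopt : PySem.List.max? a (fun x => x) with
    | none => exact absurd ((PySem.List.max?_eq_none_iff a _).mp hopt) ha
    | some m => exact ⟨m, rfl⟩
  have hMmax : ∀ y ∈ a, y ≤ Mv := fun y hy => PySem.List.max?_isMax hMv y hy
  have hMlast : Mv = sa[sa.length - 1]'(by omega) := by
    apply le_antisymm
    · obtain ⟨i, hi, hieq⟩ := List.mem_iff_getElem.mp (hperm.mem_iff.mpr (PySem.List.max?_mem hMv))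
      rw [← hieq]; exact hmono i (sa.length - 1) (by omega) (by omega)
    · exact hMmax _ (hperm.subset (List.getElem_mem _))
  have hsaM : ∀ y ∈ sa, y ≤ Mv := fun y hy => hMmax y (hperm.subset hy)
  have hpw : List.Pairwise (· ≤ ·) (needsFrom 0 0 b) :=
    (List.pairwise_cons.mp (needsFrom_pairwise b 0 0)).2
  have hge0 : ∀ v ∈ needsFrom 0 0 b, (0:Int) ≤ v :=
    (List.pairwise_cons.mp (needsFrom_pairwise b 0 0)).1
  rw [A_char, B_char, ← hsa, hMv]
  simp only [Option.getD_some]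
  set L_A := (PySem.List.pyRange 0 (Mv + 1) 1).map (fA a b) with hLA
  set terms := termsFrom sa ((sa.length : Int)) 0 0 0 b with hterms
  apply le_antisymm
  · apply foldl_max_le
    · exact (PySem.List.le_foldl_max terms 0).1
    · intro t ht
      obtain ⟨x, hxr, rfl⟩ := List.mem_map.mp ht
      obtain ⟨hx0, hxM⟩ := PySem.List.mem_pyRange_one.mp hxr
      have hg := greedy_eq_takeWhile (cntI a x) b 0 0 0 (hcnt0 x)
      set tw := (needsFrom 0 0 b).takeWhile (fun v => decide (v ≤ cntI a x)) with htw
      have hfa : fA a b x = x * (tw.length : Int) := by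
        unfold fA; rw [hg]; ring
      rcases Nat.eq_zero_or_pos tw.length with hk0 | hkpos
      · rw [hfa, hk0]; simpa using (PySem.List.le_foldl_max terms 0).1
      rcases eq_or_lt_of_le hx0 with hxz | hxpos
      · rw [hfa, ← hxz]; simpa using (PySem.List.le_foldl_max terms 0).1
      -- x ≥ 1, k ≥ 1
      obtain ⟨suf, hsuf⟩ := List.takeWhile_prefix (l := needsFrom 0 0 b)
        (fun v => decide (v ≤ cntI a x))
      have hlt : tw.length - 1 < tw.length := by omega
      set need' := tw[tw.length - 1]'hlt with hneed'
      have hneeds_j : (needsFrom 0 0 b)[tw.length - 1]? = some need' := by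
        rw [← hsuf, List.getElem?_append_left (by omega), List.getElem?_eq_getElem hlt]
      have hneed_cnt : need' ≤ cntI a x := by
        have := List.mem_takeWhile_imp (p := fun v => decide (v ≤ cntI a x))
          (l := needsFrom 0 0 b) (x := need') (show need' ∈ tw from List.getElem_mem hlt)
        simpa using this
      have hneed0 : 0 ≤ need' := hge0 need' (List.mem_of_getElem? hneeds_j)
      have hneed_n : need' ≤ (sa.length : Int) := le_trans hneed_cnt (hcnt_len x)
      have hcov := t_cov sa ((sa.length : Int)) b 0 0 0 (tw.length - 1) need' hneeds_j hneed_n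
      have harith : (0 : Int) + ((tw.length - 1 : Nat) : Int) + 1 = (tw.length : Int) := by
        push_cast [hkpos]; omega
      rw [harith] at hcov
      have hterm_le := (PySem.List.le_foldl_max terms 0).2 _ hcov
      have hx_le : x ≤ xOf sa ((sa.length : Int)) need' := by
        rcases eq_or_lt_of_le hneed0 with hz | hpos
        · rw [← hz, xOf_zero sa hlen0, ← hMlast]; omega
        · rw [xOf_eval sa need' (by omega) hneed_n]
          by_contra hlt'
          push Not at hlt'
          have hcle := countP_le_of_gt sa hmono x need'.toNat (by omega) (by omega) hlt'
          rw [hcnt_sa x] at hneed_cnt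
          omega
      rw [hfa]
      calc x * (tw.length : Int) ≤ xOf sa ((sa.length : Int)) need' * (tw.length : Int) :=
            mul_le_mul_of_nonneg_right hx_le (by positivity)
        _ ≤ _ := hterm_le
  · apply foldl_max_le
    · exact (PySem.List.le_foldl_max L_A 0).1
    · intro t ht
      obtain ⟨j, need', hj, hneed_n, rfl⟩ := t_mem sa ((sa.length : Int)) b 0 0 0 t ht
      have hneed0 : 0 ≤ need' := hge0 need' (List.mem_of_getElem? hj)
      have hLA0 : (0:Int) ≤ L_A.foldl max 0 := (PySem.List.le_foldl_max L_A 0).1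
      rcases le_or_gt (xOf sa ((sa.length : Int)) need') 0 with hx'le | hx'pos
      · have hterm0 : xOf sa ((sa.length : Int)) need' * (0 + (j : Int) + 1) ≤ 0 := by
          have h1 : (0:Int) ≤ 0 + (j : Int) + 1 := by positivity
          exact mul_nonpos_of_nonpos_of_nonneg hx'le h1
        exact le_trans hterm0 hLA0
      · set x' := xOf sa ((sa.length : Int)) need' with hx'
        have hx'mem : x' ∈ sa := by
          rcases eq_or_lt_of_le hneed0 with hz | hpos
          · rw [hx', ← hz, xOf_zero sa hlen0]; exact List.getElem_mem _
          · rw [hx', xOf_eval sa need' (by omega) hneed_n]; exact List.getElem_mem _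
        have hx'M : x' ≤ Mv := hsaM _ hx'mem
        have hx'range : x' ∈ PySem.List.pyRange 0 (Mv + 1) 1 :=
          PySem.List.mem_pyRange_one.mpr ⟨by omega, by omega⟩
        have hfmem : fA a b x' ∈ L_A := List.mem_map.mpr ⟨x', hx'range, rfl⟩
        have hfle := (PySem.List.le_foldl_max L_A 0).2 _ hfmem
        have hcnt_ge : need' ≤ cntI a x' := by
          rcases eq_or_lt_of_le hneed0 with hz | hpos
          · rw [← hz]; exact hcnt0 x'
          · have hev : x' = sa[sa.length - need'.toNat]'(by omega) := by
              rw [hx', xOf_eval sa need' (by omega) hneed_n]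
            have hcge := countP_ge_at sa hmono need'.toNat (by omega) (by omega)
            rw [hcnt_sa x', hev]
            omega
        have hkge : (0 : Int) + (j : Int) + 1 ≤ pyGreedyA (cntI a x') b 0 0 := by
          have htwl := takeWhile_len_ge (cntI a x') (needsFrom 0 0 b) j need' hpw hj hcnt_ge
          rw [greedy_eq_takeWhile (cntI a x') b 0 0 0 (hcnt0 x')]
          omega
        calc x' * (0 + (j : Int) + 1) ≤ x' * pyGreedyA (cntI a x') b 0 0 :=
              mul_le_mul_of_nonneg_left hkge (le_of_lt hx'pos)
          _ = fA a b x' := rfl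
          _ ≤ _ := hfle

-- ===== VERDICT (by name: the statement is the Claim_ definition above) =====
theorem brute_solve_spec : Claim_equal_brute_solve := by
  intro a b _ ha
  exact main_eq a b ha
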